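-- pv_equiv track=rewrite | github.com/pypi-data/pypi-mirror-294 | packages/scipion-testrunner/scipion_testrunner-1.0.1.tar.gz/scipion_testrunner-1.0.1/src/scipion_testrunner/domain/test_service.py | __get_sorted_results
-- ===== SOURCE A (Python) =====
-- from typing import Dict, List, Tuple
--
-- def __get_sorted_results(tests: List[str], failed_tests: List[str]) -> Dict[str, List[str]]:
-- 	"""
-- 	### Groups the passed/failed test results by origin file
--
-- 	#### Params:
-- 	- tests (list[str]): Full list of tests
-- 	- failed_tests (list[str]): Names of the tests that failed
--
-- 	#### Returns:
-- 	- (dict[str, list[str]]): Tests grouped by origin file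
-- 	"""
-- 	passed_name = 'passed'
-- 	failed_name = 'failed'
-- 	results = {}
-- 	for origin_file, test_group in __group_tests_by_file(tests).items():
-- 		results[origin_file] = {failed_name: [], passed_name: []}
-- 		for test in test_group:
-- 			destination_list = failed_name if f"{origin_file}.{test}" in failed_tests else passed_name
-- 			results[origin_file][destination_list].append(test)
--
-- 	return results
--
-- def __group_tests_by_file(tests: List[str]) -> Dict[str, List[str]]:
-- 	"""
-- 	### Groups tests by origin file
--
-- 	#### Params:
-- 	- tests (list[str]): Full list of tests
--
-- 	#### Returns:
-- 	- (dict[str, list[str]]): Tests grouped by origin file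
-- 	"""
-- 	grouped_tests = {}
-- 	for test in tests:
-- 		full_path = test.split(".")
-- 		grouped_tests.setdefault('.'.join(full_path[:-1]), []).append(full_path[-1])
-- 	return grouped_tests
-- ===== SOURCE B (Python) =====
-- from typing import Dict, List
--
--
-- def __get_sorted_results(tests: List[str], failed_tests: List[str]) -> Dict[str, List[str]]:
-- 	"""Single pass: build the passed/failed buckets directly, without the intermediate grouping dict."""
-- 	failed_set = set(failed_tests)
-- 	results = {}
-- 	for test in tests:
-- 		parts = test.split('.')
-- 		origin_file = '.'.join(parts[:-1])
-- 		name = parts[-1]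
-- 		if origin_file not in results:
-- 			results[origin_file] = {'failed': [], 'passed': []}
-- 		key = 'failed' if f"{origin_file}.{name}" in failed_set else 'passed'
-- 		results[origin_file][key].append(name)
-- 	return results
-- ===== Notes on version B (the rewrite author's own statement) =====
-- stated objective: faster
-- what changed: Replaces the two-phase group-then-classify (building an intermediate grouping dict and then iterating it with a linear 'in failed_tests' list scan per test) by a single pass over tests that fills the passed/failed buckets directly, with failed_tests preloaded into a set for O(1) membership.
import Mathlib
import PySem

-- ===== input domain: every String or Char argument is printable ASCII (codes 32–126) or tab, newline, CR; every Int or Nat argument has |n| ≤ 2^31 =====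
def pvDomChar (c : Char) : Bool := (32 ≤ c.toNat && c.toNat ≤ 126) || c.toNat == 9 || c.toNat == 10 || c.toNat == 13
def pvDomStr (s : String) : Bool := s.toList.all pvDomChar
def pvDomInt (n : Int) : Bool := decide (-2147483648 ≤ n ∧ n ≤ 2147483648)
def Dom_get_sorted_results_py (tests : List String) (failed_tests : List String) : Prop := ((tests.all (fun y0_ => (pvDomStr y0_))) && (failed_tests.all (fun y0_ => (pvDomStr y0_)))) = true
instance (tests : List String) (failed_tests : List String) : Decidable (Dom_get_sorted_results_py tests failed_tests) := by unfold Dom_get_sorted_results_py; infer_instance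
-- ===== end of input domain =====

-- B replaces A's two-phase group-then-classify (intermediate grouping dict, then a list scan of
-- failed_tests per test) by a single pass that fills the buckets directly, with failed_tests in a set.


-- ===== PORT A =====
-- __group_tests_by_file: grouped.setdefault(prefix, []).append(last) is ported as
-- Dict.modify prefix [] (· ++ [last]), which is exactly setdefault-then-append.
-- test.split(".") never yields [], so the pyGet? at -1 never misses ('.getD ""' is unreachable).
def pvGroupTestsByFile (tests : List String) : PySem.Dict String (List String) :=
  tests.foldl
    (fun grouped test =>
      let full_path := (PySem.Str.split? test ".").getD []
      grouped.modify (PySem.Str.join "." (PySem.List.slice full_path none (some (-1)))) []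
        (· ++ [(PySem.List.pyGet? full_path (-1)).getD ""]))
    PySem.Dict.empty

-- results[origin][dest].append(test) is ported as a modify at origin (the key is always present,
-- having just been inserted) composed with a modify at dest inside the inner dict.
def get_sorted_results_py (tests : List String) (failed_tests : List String) : List (String × List (String × List String)) :=
  let results :=
    (pvGroupTestsByFile tests).items.foldl
      (fun results og =>
        let origin_file := og.1
        let results := results.insert origin_file (PySem.Dict.ofList [("failed", []), ("passed", [])])
        og.2.foldl
          (fun results test =>
            let destination_list := if (origin_file ++ "." ++ test) ∈ failed_tests then "failed" else "passed"
            results.modify origin_file PySem.Dict.empty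
              (fun d => d.modify destination_list [] (· ++ [test])))
          results)
      PySem.Dict.empty
  results.items.map (fun p => (p.1, p.2.items))

-- ===== PORT B =====
-- single pass; results[origin][key].append(name) ported as nested modify (origin always present here).
def get_sorted_results_py_alt (tests : List String) (failed_tests : List String) : List (String × List (String × List String)) :=
  let failed_set := PySem.Set.ofList failed_tests
  let results :=
    tests.foldl
      (fun results test =>
        let parts := (PySem.Str.split? test ".").getD []
        let origin_file := PySem.Str.join "." (PySem.List.slice parts none (some (-1)))
        let name := (PySem.List.pyGet? parts (-1)).getD ""
        let results := if results.contains origin_file then results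
          else results.insert origin_file (PySem.Dict.ofList [("failed", []), ("passed", [])])
        let key := if (origin_file ++ "." ++ name) ∈ failed_set then "failed" else "passed"
        results.modify origin_file PySem.Dict.empty
          (fun d => d.modify key [] (· ++ [name])))
      PySem.Dict.empty
  results.items.map (fun p => (p.1, p.2.items))

-- ===== PRECONDITION & SPEC =====
def Spec_get_sorted_results_py (tests : List String) (failed_tests : List String) (out : List (String × List (String × List String))) : Prop := out = get_sorted_results_py_alt tests failed_tests
instance (tests : List String) (failed_tests : List String) (out : List (String × List (String × List String))) : Decidable (Spec_get_sorted_results_py tests failed_tests out) := by unfold Spec_get_sorted_results_py; infer_instance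

-- ===== CLAIM (what is proved, stated in full; the proofs are below) =====
def Claim_equal_get_sorted_results_py : Prop := ∀ (tests : List String) (failed_tests : List String), Dom_get_sorted_results_py tests failed_tests → Spec_get_sorted_results_py tests failed_tests (get_sorted_results_py tests failed_tests)

-- ===== LEMMAS AND PROOFS =====

-- shared reading of one test string
def pvOrigin (t : String) : String :=
  PySem.Str.join "." (PySem.List.slice ((PySem.Str.split? t ".").getD []) none (some (-1)))
def pvName (t : String) : String :=
  (PySem.List.pyGet? ((PySem.Str.split? t ".").getD []) (-1)).getD ""
def pvInit : PySem.Dict String (List String) := PySem.Dict.ofList [("failed", []), ("passed", [])]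
def pvInner (fs : List String) (o : String) (d : PySem.Dict String (List String)) (n : String) :
    PySem.Dict String (List String) :=
  d.modify (if (o ++ "." ++ n) ∈ fs then "failed" else "passed") [] (· ++ [n])
def pvClassify (fs : List String) (o : String) (g : List String) : PySem.Dict String (List String) :=
  g.foldl (pvInner fs o) pvInit
def pvNamesAt (o : String) (ts : List String) : List String :=
  (ts.filter (fun t => pvOrigin t == o)).map pvName

-- the two loop bodies, named
def pvStepA (fs : List String) (r : PySem.Dict String (PySem.Dict String (List String)))
    (og : String × List String) : PySem.Dict String (PySem.Dict String (List String)) :=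
  og.2.foldl (fun r n => r.modify og.1 PySem.Dict.empty (fun d => pvInner fs og.1 d n))
    (r.insert og.1 pvInit)
def pvStepB (fs : List String) (r : PySem.Dict String (PySem.Dict String (List String)))
    (t : String) : PySem.Dict String (PySem.Dict String (List String)) :=
  (if r.contains (pvOrigin t) then r else r.insert (pvOrigin t) pvInit).modify (pvOrigin t)
    PySem.Dict.empty (fun d => pvInner fs (pvOrigin t) d (pvName t))

theorem pvPortA_eq (tests fs : List String) :
    get_sorted_results_py tests fs =
      ((pvGroupTestsByFile tests).items.foldl (pvStepA fs) PySem.Dict.empty).items.map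
        (fun p => (p.1, p.2.items)) := rfl

theorem pvPortB_eq (tests fs : List String) :
    get_sorted_results_py_alt tests fs =
      (tests.foldl (pvStepB fs) PySem.Dict.empty).items.map (fun p => (p.1, p.2.items)) := by
  unfold get_sorted_results_py_alt pvStepB pvInner pvOrigin pvName pvInit
  simp [PySem.Set.mem_ofList]

theorem pvGroup_eq (tests : List String) :
    pvGroupTestsByFile tests =
      (tests.map (fun t => (pvOrigin t, pvName t))).foldl
        (fun d p => d.modify p.1 [] (· ++ [p.2])) PySem.Dict.empty := by
  unfold pvGroupTestsByFile pvOrigin pvName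
  rw [List.foldl_map]

theorem pvGroup_keys (tests : List String) :
    (pvGroupTestsByFile tests).keys = PySem.Set.update [] (tests.map pvOrigin) := by
  unfold pvGroupTestsByFile
  have h := PySem.Dict.keys_foldl_modify_key tests pvOrigin ([] : List String)
    (fun _ t => (· ++ [pvName t])) PySem.Dict.empty
  simpa [pvOrigin, pvName, PySem.Dict.keys_empty] using h

theorem pvGroup_nodup (tests : List String) : (pvGroupTestsByFile tests).keys.Nodup := by
  unfold pvGroupTestsByFile
  exact PySem.Dict.nodup_keys_foldl_modify_key tests pvOrigin ([] : List String)
    (fun _ t => (· ++ [pvName t])) PySem.Dict.empty PySem.Dict.nodup_keys_empty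

theorem pvGroup_getD (tests : List String) (o : String) :
    (pvGroupTestsByFile tests).getD o [] = pvNamesAt o tests := by
  rw [pvGroup_eq, PySem.Dict.getD_foldl_modify_append]
  simp [pvNamesAt, List.filter_map, Function.comp_def]

-- in a nodup-headed list of pairs, every tail key differs from the head key
theorem pvFresh_ne (ps : List (String × List String)) (o1 : String)
    (hnd : (o1 :: ps.map Prod.fst).Nodup) : ∀ p ∈ ps, p.1 ≠ o1 := by
  intro p hp he
  have hm : p.1 ∈ ps.map Prod.fst := List.mem_map_of_mem hp
  rw [he] at hm
  exact (List.nodup_cons.mp hnd).1 hm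

-- A's inner loop touches only the entry at og.1
theorem pvFoldModify_getD_self (fs : List String) (o : String) (g : List String)
    (r : PySem.Dict String (PySem.Dict String (List String))) :
    (g.foldl (fun r n => r.modify o PySem.Dict.empty (fun d => pvInner fs o d n)) r).getD o
        PySem.Dict.empty =
      g.foldl (pvInner fs o) (r.getD o PySem.Dict.empty) := by
  induction g generalizing r with
  | nil => rfl
  | cons n g ih => simp [List.foldl_cons, ih, PySem.Dict.getD_modify_self]

theorem pvFoldModify_getD_ne (fs : List String) (o o' : String) (h : o' ≠ o) (g : List String)
    (r : PySem.Dict String (PySem.Dict String (List String))) :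
    (g.foldl (fun r n => r.modify o PySem.Dict.empty (fun d => pvInner fs o d n)) r).getD o'
        PySem.Dict.empty = r.getD o' PySem.Dict.empty := by
  induction g generalizing r with
  | nil => rfl
  | cons n g ih => simp [List.foldl_cons, ih, PySem.Dict.getD_modify_of_ne _ _ _ h]

theorem pvFoldModify_keys (fs : List String) (o : String) (g : List String)
    (r : PySem.Dict String (PySem.Dict String (List String))) (h : r.contains o = true) :
    (g.foldl (fun r n => r.modify o PySem.Dict.empty (fun d => pvInner fs o d n)) r).keys =
      r.keys := by
  induction g generalizing r with
  | nil => rfl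
  | cons n g ih =>
      rw [List.foldl_cons, ih _ (by simp [PySem.Dict.contains_modify])]
      rw [PySem.Dict.keys_modify, PySem.Dict.keys_insert_of_contains _ _ h]

theorem pvFoldModify_contains (fs : List String) (o o' : String) (g : List String)
    (r : PySem.Dict String (PySem.Dict String (List String))) (h : r.contains o = true) :
    (g.foldl (fun r n => r.modify o PySem.Dict.empty (fun d => pvInner fs o d n)) r).contains o' =
      (o' == o || r.contains o') := by
  induction g generalizing r with
  | nil =>
      cases hb : (o' == o)
      · simp
      · simp only [List.foldl_nil, Bool.true_or]
        rw [eq_of_beq hb, h]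
  | cons n g ih =>
      rw [List.foldl_cons, ih _ (by simp [PySem.Dict.contains_modify]),
        PySem.Dict.contains_modify]
      cases hb : (o' == o) <;> simp

theorem pvStepA_keys (fs : List String) (r : PySem.Dict String (PySem.Dict String (List String)))
    (og : String × List String) (h : r.contains og.1 = false) :
    (pvStepA fs r og).keys = r.keys ++ [og.1] := by
  unfold pvStepA
  rw [pvFoldModify_keys fs og.1 og.2 _ (by simp),
    PySem.Dict.keys_insert_of_not_contains _ _ h]

theorem pvStepA_contains (fs : List String) (r : PySem.Dict String (PySem.Dict String (List String)))
    (og : String × List String) (o' : String) :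
    (pvStepA fs r og).contains o' = (o' == og.1 || r.contains o') := by
  unfold pvStepA
  rw [pvFoldModify_contains fs og.1 o' og.2 _ (by simp),
    PySem.Dict.contains_insert]
  cases (o' == og.1) <;> simp

theorem pvStepA_getD_self (fs : List String) (r : PySem.Dict String (PySem.Dict String (List String)))
    (og : String × List String) :
    (pvStepA fs r og).getD og.1 PySem.Dict.empty = pvClassify fs og.1 og.2 := by
  unfold pvStepA pvClassify
  rw [pvFoldModify_getD_self, PySem.Dict.getD_insert_self]

theorem pvStepA_getD_ne (fs : List String) (r : PySem.Dict String (PySem.Dict String (List String)))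
    (og : String × List String) (o' : String) (h : o' ≠ og.1) :
    (pvStepA fs r og).getD o' PySem.Dict.empty = r.getD o' PySem.Dict.empty := by
  unfold pvStepA
  rw [pvFoldModify_getD_ne fs og.1 o' h, PySem.Dict.getD_insert_of_ne _ _ _ h]

-- A's outer fold over a nodup-keyed, fresh items list
theorem pvFoldA_keys (fs : List String) (ps : List (String × List String)) :
    ∀ (r : PySem.Dict String (PySem.Dict String (List String))),
      (∀ p ∈ ps, r.contains p.1 = false) → (ps.map Prod.fst).Nodup →
      (ps.foldl (pvStepA fs) r).keys = r.keys ++ ps.map Prod.fst := by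
  induction ps with
  | nil => intro r _ _; simp
  | cons og ps ih =>
      intro r hfresh hnd
      have hnd' : (og.1 :: ps.map Prod.fst).Nodup := by simpa using hnd
      rw [List.foldl_cons, ih _ ?_ hnd'.of_cons]
      · rw [pvStepA_keys fs r og (hfresh og (by simp))]; simp
      · intro p hp
        rw [pvStepA_contains]
        simp [pvFresh_ne ps og.1 hnd' p hp, hfresh p (List.mem_cons_of_mem _ hp)]

theorem pvFoldA_getD (fs : List String) (ps : List (String × List String)) :
    ∀ (r : PySem.Dict String (PySem.Dict String (List String))),
      (∀ p ∈ ps, r.contains p.1 = false) → (ps.map Prod.fst).Nodup →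
      ∀ og ∈ ps, (ps.foldl (pvStepA fs) r).getD og.1 PySem.Dict.empty = pvClassify fs og.1 og.2 := by
  induction ps with
  | nil => intro r _ _ og h; simp at h
  | cons og₀ ps ih =>
      intro r hfresh hnd og hog
      have hnd' : (og₀.1 :: ps.map Prod.fst).Nodup := by simpa using hnd
      have hfresh' : ∀ p ∈ ps, (pvStepA fs r og₀).contains p.1 = false := by
        intro p hp
        rw [pvStepA_contains]
        simp [pvFresh_ne ps og₀.1 hnd' p hp, hfresh p (List.mem_cons_of_mem _ hp)]
      rcases List.mem_cons.mp hog with he | hm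
      · subst he
        rw [List.foldl_cons]
        have hne : ∀ p ∈ ps, p.1 ≠ og.1 := pvFresh_ne ps og.1 hnd'
        -- og.1 is untouched by the rest of the fold
        have huntouched : ∀ (ps' : List (String × List String))
            (r' : PySem.Dict String (PySem.Dict String (List String))),
            (∀ p ∈ ps', p.1 ≠ og.1) →
            (ps'.foldl (pvStepA fs) r').getD og.1 PySem.Dict.empty = r'.getD og.1 PySem.Dict.empty := by
          intro ps'
          induction ps' with
          | nil => intro r' _; rfl
          | cons q qs ihq =>
              intro r' hq
              rw [List.foldl_cons, ihq _ (fun p hp => hq p (List.mem_cons_of_mem _ hp)),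
                pvStepA_getD_ne fs r' q og.1 (Ne.symm (hq q (by simp)))]
        rw [huntouched ps _ hne, pvStepA_getD_self]
      · rw [List.foldl_cons]
        exact ih _ hfresh' hnd'.of_cons og hm

-- B's fold, one step
theorem pvStepB_contains (fs : List String) (r : PySem.Dict String (PySem.Dict String (List String)))
    (t : String) (o' : String) :
    (pvStepB fs r t).contains o' = (o' == pvOrigin t || r.contains o') := by
  unfold pvStepB
  by_cases h : r.contains (pvOrigin t) = true
  · rw [if_pos h, PySem.Dict.contains_modify]
  · rw [if_neg h, PySem.Dict.contains_modify, PySem.Dict.contains_insert]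
    cases (o' == pvOrigin t) <;> simp

theorem pvStepB_keys (fs : List String) (r : PySem.Dict String (PySem.Dict String (List String)))
    (t : String) : (pvStepB fs r t).keys = PySem.Set.add r.keys (pvOrigin t) := by
  unfold pvStepB PySem.Set.add
  have hck : r.contains (pvOrigin t) = PySem.Set.contains r.keys (pvOrigin t) := by
    rw [PySem.Dict.contains_eq_decide_mem_keys]
    cases hc : PySem.Set.contains r.keys (pvOrigin t)
    · simp only [decide_eq_false_iff_not]
      intro hm
      exact absurd (show PySem.Set.contains r.keys (pvOrigin t) = true from List.elem_iff.mpr hm)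
        (by rw [hc]; exact Bool.false_ne_true)
    · simp [List.elem_iff.mp hc]
  by_cases h : r.contains (pvOrigin t) = true
  · rw [if_pos h, if_pos (hck ▸ h), PySem.Dict.keys_modify,
      PySem.Dict.keys_insert_of_contains _ _ h]
  · have h' := eq_false_of_ne_true h
    rw [if_neg h, if_neg (by rw [← hck, h']; simp), PySem.Dict.keys_modify,
      PySem.Dict.keys_insert_of_contains _ _ (by simp),
      PySem.Dict.keys_insert_of_not_contains _ _ h']

theorem pvStepB_getD_self (fs : List String) (r : PySem.Dict String (PySem.Dict String (List String)))
    (t : String) :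
    (pvStepB fs r t).getD (pvOrigin t) PySem.Dict.empty =
      pvInner fs (pvOrigin t)
        (if r.contains (pvOrigin t) then r.getD (pvOrigin t) PySem.Dict.empty else pvInit)
        (pvName t) := by
  unfold pvStepB
  by_cases h : r.contains (pvOrigin t) = true
  · rw [if_pos h, if_pos h, PySem.Dict.getD_modify_self]
  · rw [if_neg h, if_neg h, PySem.Dict.getD_modify_self, PySem.Dict.getD_insert_self]

theorem pvStepB_getD_ne (fs : List String) (r : PySem.Dict String (PySem.Dict String (List String)))
    (t : String) (o' : String) (h : o' ≠ pvOrigin t) :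
    (pvStepB fs r t).getD o' PySem.Dict.empty = r.getD o' PySem.Dict.empty := by
  unfold pvStepB
  rw [PySem.Dict.getD_modify_of_ne _ _ _ h]
  by_cases hc : r.contains (pvOrigin t) = true
  · rw [if_pos hc]
  · rw [if_neg hc, PySem.Dict.getD_insert_of_ne _ _ _ h]

theorem pvFoldB_keys (fs : List String) (ts : List String) :
    ∀ (r : PySem.Dict String (PySem.Dict String (List String))),
      (ts.foldl (pvStepB fs) r).keys = PySem.Set.update r.keys (ts.map pvOrigin) := by
  induction ts with
  | nil => intro r; simp [PySem.Set.update]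
  | cons t ts ih =>
      intro r
      rw [List.foldl_cons, ih, pvStepB_keys]
      simp [PySem.Set.update]

theorem pvFoldB_getD_present (fs : List String) (ts : List String) :
    ∀ (r : PySem.Dict String (PySem.Dict String (List String))) (o : String),
      r.contains o = true →
      (ts.foldl (pvStepB fs) r).getD o PySem.Dict.empty =
        (pvNamesAt o ts).foldl (pvInner fs o) (r.getD o PySem.Dict.empty) := by
  induction ts with
  | nil => intro r o _; rfl
  | cons t ts ih =>
      intro r o h
      rw [List.foldl_cons, ih _ o (by rw [pvStepB_contains]; simp [h])]
      by_cases he : pvOrigin t = o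
      · subst he
        rw [pvStepB_getD_self, if_pos h]
        simp [pvNamesAt]

      · rw [pvStepB_getD_ne fs r t o (fun hx => he hx.symm)]
        have hna : pvNamesAt o (t :: ts) = pvNamesAt o ts := by
          simp [pvNamesAt, he]
        rw [hna]

theorem pvFoldB_getD (fs : List String) (ts : List String) :
    ∀ (r : PySem.Dict String (PySem.Dict String (List String))) (o : String),
      r.contains o = false → o ∈ ts.map pvOrigin →
      (ts.foldl (pvStepB fs) r).getD o PySem.Dict.empty = pvClassify fs o (pvNamesAt o ts) := by
  induction ts with
  | nil => intro r o _ hm; simp at hm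
  | cons t ts ih =>
      intro r o h hm
      by_cases he : pvOrigin t = o
      · subst he
        rw [List.foldl_cons,
          pvFoldB_getD_present fs ts _ _ (by rw [pvStepB_contains]; simp),
          pvStepB_getD_self, if_neg (by simp [h])]
        simp [pvNamesAt, pvClassify]
      · rw [List.map_cons] at hm
        have hm' : o ∈ ts.map pvOrigin := by
          rcases List.mem_cons.mp hm with hx | hx
          · exact absurd hx.symm he
          · exact hx
        rw [List.foldl_cons, ih _ o ?_ hm']
        · have hna : pvNamesAt o (t :: ts) = pvNamesAt o ts := by
            simp [pvNamesAt, he]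
          rw [hna]
        · rw [pvStepB_contains]
          simp [h]
          intro hx; exact he hx.symm

-- put the two characterizations together
theorem pvMain (tests fs : List String) :
    (pvGroupTestsByFile tests).items.foldl (pvStepA fs) PySem.Dict.empty =
      tests.foldl (pvStepB fs) PySem.Dict.empty := by
  set A := (pvGroupTestsByFile tests).items.foldl (pvStepA fs) PySem.Dict.empty with hA
  set B := tests.foldl (pvStepB fs) PySem.Dict.empty with hB
  have hGnd : (pvGroupTestsByFile tests).keys.Nodup := pvGroup_nodup tests
  have hGitems := PySem.Dict.items_eq_map_keys (pvGroupTestsByFile tests) hGnd ([] : List String)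
  have hndmap : ((pvGroupTestsByFile tests).items.map Prod.fst).Nodup := hGnd
  have hkeysA : A.keys = (pvGroupTestsByFile tests).keys := by
    rw [hA, pvFoldA_keys fs _ _ (fun p _ => PySem.Dict.contains_empty p.1) hndmap,
      PySem.Dict.keys_empty, List.nil_append]
    rfl
  have hkeysB : B.keys = PySem.Set.update [] (tests.map pvOrigin) := by
    rw [hB, pvFoldB_keys, PySem.Dict.keys_empty]
  have hkeys : A.keys = B.keys := by
    rw [hkeysA, hkeysB, pvGroup_keys]
  have hndA : A.keys.Nodup := hkeysA ▸ hGnd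
  have hndB : B.keys.Nodup := hkeys ▸ hndA
  apply PySem.Dict.ext
  rw [PySem.Dict.items_eq_map_keys A hndA PySem.Dict.empty,
    PySem.Dict.items_eq_map_keys B hndB PySem.Dict.empty, ← hkeys]
  apply List.map_congr_left
  intro o ho
  have hoG : o ∈ (pvGroupTestsByFile tests).keys := hkeysA ▸ ho
  have hoU : o ∈ tests.map pvOrigin := by
    have := pvGroup_keys tests ▸ hoG
    have hsub : ∀ (l : List String) (s : PySem.Set String) (x : String),
        x ∈ PySem.Set.update s l → x ∈ s ∨ x ∈ l := by
      intro l
      induction l with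
      | nil => intro s x hx; exact Or.inl (by simpa [PySem.Set.update] using hx)
      | cons y l ihl =>
          intro s x hx
          rcases ihl (PySem.Set.add s y) x (by simpa [PySem.Set.update] using hx) with hx' | hx'
          · rcases (PySem.Set.mem_add s y x).mp hx' with h1 | h1
            · exact Or.inl h1
            · exact Or.inr (by simp [h1])
          · exact Or.inr (List.mem_cons_of_mem _ hx')
    rcases hsub (tests.map pvOrigin) [] o this with h1 | h1
    · simp at h1
    · exact h1
  have hAo : A.getD o PySem.Dict.empty = pvClassify fs o (pvNamesAt o tests) := by
    have hmem : (o, (pvGroupTestsByFile tests).getD o []) ∈ (pvGroupTestsByFile tests).items := by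
      rw [hGitems]; exact List.mem_map_of_mem hoG
    have := pvFoldA_getD fs (pvGroupTestsByFile tests).items PySem.Dict.empty
      (fun p _ => PySem.Dict.contains_empty p.1) hndmap _ hmem
    rw [hA, this, pvGroup_getD]
  have hBo : B.getD o PySem.Dict.empty = pvClassify fs o (pvNamesAt o tests) := by
    rw [hB, pvFoldB_getD fs tests PySem.Dict.empty o (PySem.Dict.contains_empty o) hoU]
  simp [hAo, hBo]

-- ===== VERDICT (by name: the statement is the Claim_ definition above) =====
theorem get_sorted_results_py_spec : Claim_equal_get_sorted_results_py := by
  intro tests failed_tests _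
  unfold Spec_get_sorted_results_py
  rw [pvPortA_eq, pvPortB_eq, pvMain]
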